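-- pv_equiv track=rewrite | github.com/luminousphotonics/radiance_simuls | generate_emitters_cob.py | _ring_ij
-- ===== SOURCE A (Python) =====
-- from typing import Any, Dict, List, Tuple
--
-- def _ring_ij(L: int) -> List[Tuple[int, int]]:
--     if L == 0:
--         return [(0, 0)]
--     pts: List[Tuple[int, int]] = []
--     i = L
--     j = 0
--     for k in range(L):
--         pts.append((i - k, j - k))
--     for k in range(L):
--         pts.append((0 - k, -L + k))
--     for k in range(L):
--         pts.append((-L + k, 0 + k))
--     for k in range(L):
--         pts.append((0 + k, L - k))
--     return pts
-- ===== SOURCE B (Python) =====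
-- from typing import List, Tuple
--
-- def _ring_ij(L: int) -> List[Tuple[int, int]]:
--     if L == 0:
--         return [(0, 0)]
--     # 4-fold rotational symmetry: compute one diamond edge, derive the rest
--     # by repeatedly applying the quarter-turn rotation (i, j) -> (j, -i).
--     edge = [(L - k, -k) for k in range(L)]
--     out: List[Tuple[int, int]] = []
--     for _ in range(4):
--         out += edge
--         edge = [(j, -i) for (i, j) in edge]
--     return out
-- ===== Notes on version B (the rewrite author's own statement) =====
-- stated objective: alternative
-- what changed: Instead of writing out all four edges with separate index formulas, B computes only the first edge and generates the other three by repeatedly applying the diamond's quarter-turn rotational symmetry (i,j)->(j,-i) as map passes over the edge list.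
import Mathlib
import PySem

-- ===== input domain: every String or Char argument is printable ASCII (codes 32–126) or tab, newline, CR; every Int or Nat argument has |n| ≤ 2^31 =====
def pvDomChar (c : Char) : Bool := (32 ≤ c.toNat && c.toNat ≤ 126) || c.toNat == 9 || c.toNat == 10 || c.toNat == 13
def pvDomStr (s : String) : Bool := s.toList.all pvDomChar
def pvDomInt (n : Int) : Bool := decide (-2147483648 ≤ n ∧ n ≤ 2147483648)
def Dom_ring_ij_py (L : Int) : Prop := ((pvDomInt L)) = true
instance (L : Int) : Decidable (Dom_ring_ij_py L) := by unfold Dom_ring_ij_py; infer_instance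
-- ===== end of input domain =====

-- B computes only the first diamond edge and derives the other three edges by
-- repeatedly applying the quarter-turn rotation (i,j) -> (j,-i) (objective: alternative
-- symmetry-based construction, same O(L) cost and identical output).

-- ===== PORT A =====
def ring_ij_py (L : Int) : List (Int × Int) :=
  if L == 0 then [(0, 0)]
  else
    let pts : List (Int × Int) := []
    let i := L
    let j := (0 : Int)
    let pts := (PySem.List.pyRange 0 L 1).foldl (fun pts k => pts ++ [(i - k, j - k)]) pts
    let pts := (PySem.List.pyRange 0 L 1).foldl (fun pts k => pts ++ [(0 - k, -L + k)]) pts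
    let pts := (PySem.List.pyRange 0 L 1).foldl (fun pts k => pts ++ [(-L + k, 0 + k)]) pts
    let pts := (PySem.List.pyRange 0 L 1).foldl (fun pts k => pts ++ [(0 + k, L - k)]) pts
    pts

-- ===== PORT B =====
-- the quarter-turn rotation (i, j) -> (j, -i) used by Source B's inner comprehension
def pvRot (p : Int × Int) : Int × Int := (p.2, -p.1)

def ring_ij_py_alt (L : Int) : List (Int × Int) :=
  if L == 0 then [(0, 0)]
  else
    let edge := (PySem.List.pyRange 0 L 1).map (fun k => (L - k, -k))
    let st := (List.range 4).foldl
      (fun (st : List (Int × Int) × List (Int × Int)) _ =>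
        (st.1 ++ st.2, st.2.map pvRot)) ([], edge)
    st.1

-- ===== PRECONDITION & SPEC =====
def Spec_ring_ij_py (L : Int) (out : List (Int × Int)) : Prop := out = ring_ij_py_alt L
instance (L : Int) (out : List (Int × Int)) : Decidable (Spec_ring_ij_py L out) := by unfold Spec_ring_ij_py; infer_instance

-- ===== CLAIM =====
def Claim_equal_ring_ij_py : Prop := ∀ (L : Int), Dom_ring_ij_py L → Spec_ring_ij_py L (ring_ij_py L)

-- ===== LEMMAS AND PROOFS =====

theorem ring_ij_py_eq_alt (L : Int) : ring_ij_py L = ring_ij_py_alt L := by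
  rcases lt_trichotomy L 0 with hL | hL | hL
  · -- L < 0 : every range is empty, both return []
    simp only [ring_ij_py, ring_ij_py_alt, beq_iff_eq, if_neg (by omega : ¬ L = 0)]
    rw [PySem.List.pyRange_one_eq_nil (le_of_lt hL)]
    simp [List.range_succ]
  · subst hL; rfl
  · -- L > 0
    simp only [ring_ij_py, ring_ij_py_alt, beq_iff_eq, if_neg (by omega : ¬ L = 0)]
    -- B side: unroll the four symmetry passes
    simp only [show List.range 4 = [0, 1, 2, 3] from rfl, List.foldl_cons, List.foldl_nil,
      List.map_map]
    -- both sides: maps over List.range L.toNat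
    rw [PySem.List.pyRange_one 0 L]
    simp only [PySem.List.foldl_append_singleton_eq_map, List.map_map, List.nil_append,
      List.append_assoc]
    refine congrArg₂ (· ++ ·) ?_ (congrArg₂ (· ++ ·) ?_ (congrArg₂ (· ++ ·) ?_ ?_)) <;>
      refine List.map_congr_left fun k _ => ?_ <;>
      · simp only [Function.comp_apply, pvRot, Prod.mk.injEq]
        constructor <;> first | trivial | ring

-- ===== VERDICT =====
theorem ring_ij_py_spec : Claim_equal_ring_ij_py := by
  intro L _
  exact ring_ij_py_eq_alt L
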